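/- GENERATED by tools/mkcompositions.py from design/units.gif.tsv (unit `prog_main.COMPOSITION`) — do not edit.
   THE PROOF of the composition unit `prog_main.COMPOSITION`: the 3 segments of `prog_main` chain into its contract, by the theorem
   `Gif.Spec.prog_main.compose` (proved next to the cut assertions). -/
import Gif.Spec.Units.prog_main_COMPOSITION

/-- The segments of `prog_main` compose into its contract. -/
theorem Gif.Spec.Proved.prog_main_COMPOSITION_ok : Gif.Spec.prog_main_COMPOSITION.Statement := by
  intro Lay _hLay μ _hμ u₀ h_prog_main_P h_prog_main_1 h_prog_main_E
  apply Gif.Spec.prog_main.compose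
  all_goals assumption
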